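-- pv_equiv track=rewrite | github.com/USNavalResearchLaboratory/SeaRay | plotter.py | ParseSlices
-- ===== SOURCE A (Python) =====
-- def SliceAxes(plot_ax):
-- 	'''Deduce the slice axes from the plotting axes'''
-- 	ans = ()
-- 	for ax in range(4):
-- 		if ax not in plot_ax:
-- 			ans += (ax,)
-- 	return ans
--
-- def ParseSlices(dims,plot_ax,cmd_str):
-- 	'''Function to generate a list of slice tuples for the movie.
-- 	plot_ax = tuple with the plotting axes.
-- 	cmd_str = string with comma delimited ranges or indices.
-- 	Returns slice_tuples,data_ax,movie.'''
-- 	sax = SliceAxes(plot_ax)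
-- 	slice_tuples = []
-- 	range_tuples = []
-- 	movie = False
-- 	# Define data axes such that time and frequency have the same index
-- 	data_ax = ()
-- 	for ax in plot_ax:
-- 		if ax==4:
-- 			data_ax += (0,)
-- 		else:
-- 			data_ax += (ax,)
-- 	# Construct list of range tuples
-- 	for saxi,slice_str in enumerate(cmd_str.split(',')):
-- 		rng = slice_str.split(':')
-- 		tup = ()
-- 		for i,el in enumerate(rng):
-- 			if el=='' and i==0:
-- 				el = '0'
-- 			if el=='' and i==1:
-- 				el = str(dims[sax[saxi]])
-- 			if el=='' and i==2:
-- 				el = '1'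
-- 			tup += (int(el),)
-- 		range_tuples.append(tup)
-- 	# Determine the range of the movie frames
-- 	frame_rng = range(1)
-- 	for rng in range_tuples:
-- 		movie = movie or len(rng)>1
-- 		if len(rng)==2:
-- 			frame_rng = range(rng[0],rng[1])
-- 		if len(rng)==3:
-- 			frame_rng = range(rng[0],rng[1],rng[2])
-- 	# Construct list of slice tuples
-- 	for r in frame_rng:
-- 		tup = ()
-- 		for rng in range_tuples:
-- 			if len(rng)>1:
-- 				tup += (r,)
-- 			else:
-- 				tup += rng
-- 		slice_tuples.append(tup)
-- 	return slice_tuples,data_ax,movie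
-- ===== SOURCE B (Python) =====
-- def ParseSlices(dims, plot_ax, cmd_str):
--     '''Single right-to-left recursion over the comma groups: each call parses one
--     group and merges it into the tail's (template, movie, frame) summary, so no
--     range_tuples list is materialized, "last multi-element range wins" falls out
--     as "first found from the right", and each frame is stamped into the template
--     instead of re-scanning the ranges.'''
--     sax = [ax for ax in range(4) if ax not in plot_ax]
--     data_ax = tuple(0 if ax == 4 else ax for ax in plot_ax)
--
--     def tok(k, i, el):
--         if el == '':
--             if i == 0:
--                 el = '0'
--             elif i == 1:
--                 el = str(dims[sax[k]])
--             elif i == 2: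
--                 el = '1'
--         return int(el)
--
--     groups = cmd_str.split(',')
--
--     def build(k):
--         # summary of groups[k:]: (template pieces, movie flag, frame range or None)
--         if k == len(groups):
--             return [], False, None
--         vals = [tok(k, i, el) for i, el in enumerate(groups[k].split(':'))]
--         tmpl, movie, frame = build(k + 1)
--         if len(vals) == 1:
--             return [vals[0]] + tmpl, movie, frame
--         if frame is None and len(vals) in (2, 3):
--             frame = range(*vals)
--         return [None] + tmpl, True, frame
--
--     template, movie, frame = build(0)
--     if frame is None:
--         frame = range(1)
--     slice_tuples = [tuple(r if v is None else v for v in template) for r in frame]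
--     return slice_tuples, data_ax, movie
-- ===== Notes on version B (the rewrite author's own statement) =====
-- stated objective: alternative
-- what changed: A's three staged loops (build range_tuples, scan them for movie/frame_rng with last-multi-wins, then re-scan all range tuples for every frame) are replaced by one right-to-left recursion over the comma groups that returns a (template, movie, frame) summary - last-multi-wins becomes first-found-from-the-right and no range_tuples list is materialized - after which each frame is stamped into the fixed template.
import Mathlib
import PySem

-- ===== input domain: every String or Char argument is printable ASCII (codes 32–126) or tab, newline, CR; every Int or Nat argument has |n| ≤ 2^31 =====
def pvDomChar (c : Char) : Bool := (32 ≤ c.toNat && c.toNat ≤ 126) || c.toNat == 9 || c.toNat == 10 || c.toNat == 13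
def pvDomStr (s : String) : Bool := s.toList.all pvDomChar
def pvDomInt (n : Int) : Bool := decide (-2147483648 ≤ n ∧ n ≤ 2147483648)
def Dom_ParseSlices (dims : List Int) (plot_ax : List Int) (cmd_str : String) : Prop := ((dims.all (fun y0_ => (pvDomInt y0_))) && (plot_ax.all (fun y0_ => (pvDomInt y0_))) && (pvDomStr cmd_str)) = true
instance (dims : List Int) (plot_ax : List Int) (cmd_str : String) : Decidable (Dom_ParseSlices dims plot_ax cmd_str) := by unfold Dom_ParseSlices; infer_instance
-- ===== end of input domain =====

-- B replaces A's three staged loops (build range_tuples; scan them for movie/frame_rng;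
-- re-scan them once per frame) by ONE right-to-left recursion over the comma groups that
-- returns a (template, movie, frame) summary, then stamps each frame into the template
-- (objective: alternative decomposition; no range_tuples list is materialized).

-- ===== PORT A =====
-- A-side helper: the per-token computation of A's inner loop (the three `el` reassignments).
def tokA (dims sax : List Int) (saxi : Int) (q : Int × List Char) : Int :=
  let i := q.1
  let el := q.2
  let el := if el = [] ∧ i = 0 then ['0'] else el
  let el := if el = [] ∧ i = 1 then
      PySem.Int.toChars (((PySem.List.pyGet? sax saxi).bind (fun s => PySem.List.pyGet? dims s)).getD 0)
    else el
  let el := if el = [] ∧ i = 2 then ['1'] else el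
  (PySem.Int.ofChars? el).getD 0

def ParseSlices (dims : List Int) (plot_ax : List Int) (cmd_str : String) : List (List Int) × List Int × Bool :=
  -- sax = SliceAxes(plot_ax)
  let sax : List Int := (PySem.List.pyRange 0 4 1).foldl
    (fun ans ax => if ax ∉ plot_ax then ans ++ [ax] else ans) []
  let data_ax : List Int := plot_ax.foldl
    (fun acc ax => if ax = 4 then acc ++ [(0 : Int)] else acc ++ [ax]) []
  let range_tuples : List (List Int) :=
    (PySem.List.enumerate (PySem.Chars.splitOn cmd_str.toList [','])).foldl
      (fun rts p =>
        rts ++ [(PySem.List.enumerate (PySem.Chars.splitOn p.2 [':'])).foldl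
          (fun tup q => tup ++ [tokA dims sax p.1 q]) []]) []
  -- frame_rng / movie loop (two accumulators folded together)
  let fm : List Int × Bool := range_tuples.foldl
    (fun fm rng =>
      let movie := fm.2 || decide (1 < rng.length)
      let fr := if rng.length = 2 then
          PySem.List.pyRange (PySem.List.pyGetD rng 0 0) (PySem.List.pyGetD rng 1 0) 1
        else fm.1
      let fr := if rng.length = 3 then
          PySem.List.pyRange (PySem.List.pyGetD rng 0 0) (PySem.List.pyGetD rng 1 0) (PySem.List.pyGetD rng 2 0)
        else fr
      (fr, movie)) (PySem.List.pyRange 0 1 1, false)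
  let slice_tuples : List (List Int) := fm.1.foldl
    (fun st r =>
      st ++ [range_tuples.foldl (fun tup rng => if 1 < rng.length then tup ++ [r] else tup ++ rng) []]) []
  (slice_tuples, data_ax, fm.2)

-- ===== PORT B =====
-- B-side helper: `tok` of Source B (if/elif default chain, then int()).
def tokB (dims sax : List Int) (k i : Int) (el : List Char) : Int :=
  let el := if el = [] then
      if i = 0 then ['0']
      else if i = 1 then
        PySem.Int.toChars (((PySem.List.pyGet? sax k).bind (fun s => PySem.List.pyGet? dims s)).getD 0)
      else if i = 2 then ['1']
      else el
    else el
  (PySem.Int.ofChars? el).getD 0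

-- B-side helper: `build` of Source B — one right-to-left recursion returning
-- (template pieces, movie flag, frame range or none) for the remaining groups.
def buildB (dims sax : List Int) : Int → List (List Char) → List (Option Int) × Bool × Option (List Int)
  | _, [] => ([], false, none)
  | k, g :: rest =>
    let vals : List Int :=
      (PySem.List.enumerate (PySem.Chars.splitOn g [':'])).map (fun q => tokB dims sax k q.1 q.2)
    let r := buildB dims sax (k + 1) rest
    if vals.length = 1 then (some (PySem.List.pyGetD vals 0 0) :: r.1, r.2.1, r.2.2)
    else
      let frame : Option (List Int) :=
        match r.2.2 with
        | some f => some f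
        | none =>
            if vals.length = 2 then
              some (PySem.List.pyRange (PySem.List.pyGetD vals 0 0) (PySem.List.pyGetD vals 1 0) 1)
            else if vals.length = 3 then
              some (PySem.List.pyRange (PySem.List.pyGetD vals 0 0) (PySem.List.pyGetD vals 1 0)
                (PySem.List.pyGetD vals 2 0))
            else none
      ((none : Option Int) :: r.1, true, frame)

def ParseSlices_alt (dims : List Int) (plot_ax : List Int) (cmd_str : String) : List (List Int) × List Int × Bool :=
  let sax : List Int := (PySem.List.pyRange 0 4 1).filter (fun ax => decide (ax ∉ plot_ax))
  let data_ax : List Int := plot_ax.map (fun ax => if ax = 4 then (0 : Int) else ax)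
  let b := buildB dims sax 0 (PySem.Chars.splitOn cmd_str.toList [','])
  let frame : List Int := b.2.2.getD (PySem.List.pyRange 0 1 1)
  let slice_tuples : List (List Int) := frame.map (fun r => b.1.map (fun v => v.getD r))
  (slice_tuples, data_ax, b.2.1)

-- ===== PRECONDITION & SPEC =====
-- Pre_-side helpers (independent of the ports).
def pvSax (plot_ax : List Int) : List Int :=
  (PySem.List.pyRange 0 4 1).filter (fun ax => decide (ax ∉ plot_ax))

-- one token of slice group k at position i parses without an exception in A
def pvTokOK (dims plot_ax : List Int) (k i : Int) (el : List Char) : Bool :=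
  if el = [] then
    if i = 1 then ((PySem.List.pyGet? (pvSax plot_ax) k).bind (fun s => PySem.List.pyGet? dims s)).isSome
    else decide (i = 0 ∨ i = 2)
  else (PySem.Int.ofChars? el).isSome

-- the integer value a third slice field denotes (step of a 3-element range)
def pvStep (el : List Char) : Int := if el = [] then 1 else (PySem.Int.ofChars? el).getD 0

-- Pre_ = exactly the inputs on which the Python A returns normally: every token of every
-- comma group parses (int() / the positional defaults, incl. the dims[sax[k]] lookup for an
-- empty middle field), and no 3-element range has step 0 (range() ValueError).
def Pre_ParseSlices (dims : List Int) (plot_ax : List Int) (cmd_str : String) : Prop :=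
  ∀ p ∈ PySem.List.enumerate (PySem.Chars.splitOn cmd_str.toList [',']),
    (∀ q ∈ PySem.List.enumerate (PySem.Chars.splitOn p.2 [':']),
      pvTokOK dims plot_ax p.1 q.1 q.2 = true) ∧
    ((PySem.Chars.splitOn p.2 [':']).length = 3 → pvStep ((PySem.Chars.splitOn p.2 [':']).getD 2 []) ≠ 0)
instance (dims : List Int) (plot_ax : List Int) (cmd_str : String) : Decidable (Pre_ParseSlices dims plot_ax cmd_str) := by
  unfold Pre_ParseSlices; infer_instance

def pvWitness_ParseSlices : List Int × List Int × String := ([10, 10, 10, 10], [0, 1], "2,0:5")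

def Spec_ParseSlices (dims : List Int) (plot_ax : List Int) (cmd_str : String) (out : List (List Int) × List Int × Bool) : Prop := out = ParseSlices_alt dims plot_ax cmd_str
instance (dims : List Int) (plot_ax : List Int) (cmd_str : String) (out : List (List Int) × List Int × Bool) : Decidable (Spec_ParseSlices dims plot_ax cmd_str out) := by unfold Spec_ParseSlices; infer_instance

-- ===== CLAIM (what is proved, stated in full; the proofs are below) =====
def Claim_equal_ParseSlices : Prop := ∀ (dims : List Int) (plot_ax : List Int) (cmd_str : String), Dom_ParseSlices dims plot_ax cmd_str → Pre_ParseSlices dims plot_ax cmd_str → Spec_ParseSlices dims plot_ax cmd_str (ParseSlices dims plot_ax cmd_str)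

-- ===== LEMMAS AND PROOFS =====

-- proof-side abbreviation: the parsed tuple of group g at index k (B's `vals`)
def rtOf (dims sax : List Int) (k : Int) (g : List Char) : List Int :=
  (PySem.List.enumerate (PySem.Chars.splitOn g [':'])).map (fun q => tokB dims sax k q.1 q.2)

-- A's token computation equals B's `tok`
theorem tokA_eq_tokB (dims sax : List Int) (k : Int) (q : Int × List Char) :
    tokA dims sax k q = tokB dims sax k q.1 q.2 := by
  obtain ⟨i, el⟩ := q
  unfold tokA tokB
  by_cases hel : el = [] <;>
    by_cases h0 : i = 0 <;> by_cases h1 : i = 1 <;> by_cases h2 : i = 2 <;>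
      simp [hel, h0, h1, h2]

-- splitOn never returns []
theorem splitOn_go_ne_nil (sep : List Char) :
    ∀ (fuel : Nat) (l cur : List Char) (acc : List (List Char)),
      PySem.Chars.splitOn.go sep fuel l cur acc ≠ []
  | 0, l, cur, acc => by simp [PySem.Chars.splitOn.go]
  | (f+1), [], cur, acc => by simp [PySem.Chars.splitOn.go]
  | (f+1), c :: rest, cur, acc => by
      rw [PySem.Chars.splitOn.go]
      split
      · exact splitOn_go_ne_nil sep f _ _ _
      · exact splitOn_go_ne_nil sep f _ _ _

theorem splitOn_ne_nil (s sep : List Char) : PySem.Chars.splitOn s sep ≠ [] := by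
  unfold PySem.Chars.splitOn
  exact splitOn_go_ne_nil sep _ _ _ _

theorem rtOf_ne_nil (dims sax : List Int) (k : Int) (g : List Char) :
    rtOf dims sax k g ≠ [] := by
  unfold rtOf
  intro h
  rw [List.map_eq_nil_iff] at h
  have := PySem.List.length_enumerate (xs := PySem.Chars.splitOn g [':']) (s := 0)
  rw [h] at this
  exact splitOn_ne_nil g [':'] (List.length_eq_zero_iff.mp this.symm)

-- range builders (shared by the two characterizations)
def rngOf (r : List Int) : List Int :=
  if r.length = 2 then PySem.List.pyRange (PySem.List.pyGetD r 0 0) (PySem.List.pyGetD r 1 0) 1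
  else PySem.List.pyRange (PySem.List.pyGetD r 0 0) (PySem.List.pyGetD r 1 0) (PySem.List.pyGetD r 2 0)

-- characterization of B's recursion by the list of parsed tuples of the remaining groups
theorem buildB_eq (dims sax : List Int) (gs : List (List Char)) (k : Int) :
    buildB dims sax k gs =
      (((PySem.List.enumerate gs k).map (fun p => rtOf dims sax p.1 p.2)).map
          (fun r => if r.length = 1 then some (PySem.List.pyGetD r 0 0) else none),
        ((PySem.List.enumerate gs k).map (fun p => rtOf dims sax p.1 p.2)).any
          (fun r => decide (1 < r.length)),
        (((PySem.List.enumerate gs k).map (fun p => rtOf dims sax p.1 p.2)).reverse.find?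
            (fun r => r.length == 2 || r.length == 3)).map rngOf) := by
  induction gs generalizing k with
  | nil => simp [buildB, PySem.List.enumerate_nil]
  | cons g rest ih =>
      rw [PySem.List.enumerate_cons]
      have hv : rtOf dims sax k g ≠ [] := rtOf_ne_nil dims sax k g
      show buildB dims sax k (g :: rest) = _
      rw [buildB]
      rw [ih (k + 1)]
      simp only [List.map_cons, List.any_cons, List.reverse_cons, List.find?_append]
      by_cases h1 : (rtOf dims sax k g).length = 1
      · have hnlt : ¬ (1 < (rtOf dims sax k g).length) := by omega
        have hb : ((rtOf dims sax k g).length == 2 || (rtOf dims sax k g).length == 3) = false := by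
          simp [h1]
        cases hfind : (((PySem.List.enumerate rest (k + 1)).map
            (fun p => rtOf dims sax p.1 p.2)).reverse.find?
            (fun r => r.length == 2 || r.length == 3)) with
        | some r => simp [rtOf] at h1 ⊢; simp [h1]
        | none => simp [rtOf] at h1 hb ⊢; simp [h1]
      · have hge : 1 ≤ (rtOf dims sax k g).length := by
          cases hrt : rtOf dims sax k g with
          | nil => exact absurd hrt hv
          | cons a t => simp
        have hlt : 1 < (rtOf dims sax k g).length := by omega
        cases hfind : (((PySem.List.enumerate rest (k + 1)).map
            (fun p => rtOf dims sax p.1 p.2)).reverse.find?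
            (fun r => r.length == 2 || r.length == 3)) with
        | some r => simp [rtOf] at h1 hlt ⊢; simp [h1, hlt]
        | none =>
            by_cases h2 : (rtOf dims sax k g).length = 2
            · simp [rtOf] at h1 hlt h2 ⊢
              simp [h2, rngOf]
            · by_cases h3 : (rtOf dims sax k g).length = 3
              · simp [rtOf] at h1 hlt h2 h3 ⊢
                simp [h3, rngOf]
              · have hb : ((rtOf dims sax k g).length == 2 || (rtOf dims sax k g).length == 3) = false := by
                  simp [h2, h3]
                simp [rtOf] at h1 hlt hb ⊢
                simp [h1, hlt, hb]

-- the "last 2- or 3-element range wins" loop is a reverse find?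
theorem foldl_lastSel (R2 R3 : List Int → List Int) (l : List (List Int)) :
    ∀ (init : List Int),
    l.foldl (fun fr rng =>
      if rng.length = 3 then R3 rng
      else if rng.length = 2 then R2 rng else fr) init =
    (match l.reverse.find? (fun r => r.length == 2 || r.length == 3) with
     | some r => if r.length = 2 then R2 r else R3 r
     | none => init) := by
  induction l with
  | nil => intro init; simp
  | cons a t ih =>
      intro init
      rw [List.foldl_cons, ih, List.reverse_cons, List.find?_append]
      cases h : t.reverse.find? (fun r => r.length == 2 || r.length == 3) with
      | some r => simp
      | none =>
          simp only [Option.none_or]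
          by_cases h3 : a.length = 3
          · simp [List.find?, h3]
          · by_cases h2 : a.length = 2
            · simp [List.find?, h2]
            · have hb : (a.length == 2 || a.length == 3) = false := by simp [h2, h3]
              simp [List.find?, hb, h2, h3]

-- an or-accumulating loop is `any`
theorem foldl_or_any (l : List (List Int)) (p : List Int → Bool) (b : Bool) :
    l.foldl (fun acc x => acc || p x) b = (b || l.any p) := by
  induction l generalizing b with
  | nil => simp
  | cons a t ih => simp [ih, Bool.or_assoc]

-- per-frame: A's re-scan of the range tuples equals stamping B's template
theorem inner_eq (rt : List (List Int)) (h1 : ∀ rng ∈ rt, rng.length ≠ 0) (r : Int) :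
    rt.flatMap (fun rng => if 1 < rng.length then [r] else rng)
      = rt.map (fun rng => (if rng.length = 1 then some (PySem.List.pyGetD rng 0 0) else none).getD r) := by
  induction rt with
  | nil => simp
  | cons a t ih =>
      rw [List.flatMap_cons, List.map_cons, ih (fun rng hm => h1 rng (List.mem_cons_of_mem _ hm))]
      have ha := h1 a (List.mem_cons_self ..)
      by_cases hlt : 1 < a.length
      · have hne : a.length ≠ 1 := by omega
        simp [hlt, hne]
      · have hone : a.length = 1 := by omega
        obtain ⟨x, rfl⟩ := List.length_eq_one_iff.mp hone
        simp [PySem.List.pyGetD, PySem.List.pyGet?, PySem.List.pyIdx?]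

theorem ParseSlices_spec : Claim_equal_ParseSlices := by
  intro dims plot_ax cmd_str _ _
  unfold Spec_ParseSlices ParseSlices ParseSlices_alt
  simp only [buildB_eq]
  -- data_ax loop: push the branch into the appended element
  simp only [show (fun (acc : List Int) (ax : Int) => if ax = 4 then acc ++ [(0 : Int)] else acc ++ [ax])
      = (fun acc ax => acc ++ [if ax = 4 then (0 : Int) else ax]) from
    funext fun acc => funext fun ax => by split_ifs <;> rfl]
  -- per-frame loop: push the branch into the appended chunk
  simp only [show ∀ (r : Int), (fun (tup : List Int) (rng : List Int) =>
        if 1 < rng.length then tup ++ [r] else tup ++ rng)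
      = (fun tup rng => tup ++ (if 1 < rng.length then [r] else rng)) from
    fun r => funext fun tup => funext fun rng => by split_ifs <;> rfl]
  simp only [PySem.List.foldl_append_ite_eq_filter, PySem.List.foldl_append_singleton_eq_map,
    PySem.List.foldl_append_eq_flatMap, List.nil_append, tokA_eq_tokB]
  rw [PySem.List.foldl_prod_mk
    (f := fun fr (rng : List Int) =>
      if rng.length = 3 then
        PySem.List.pyRange (PySem.List.pyGetD rng 0 0) (PySem.List.pyGetD rng 1 0) (PySem.List.pyGetD rng 2 0)
      else if rng.length = 2 then
        PySem.List.pyRange (PySem.List.pyGetD rng 0 0) (PySem.List.pyGetD rng 1 0) 1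
      else fr)
    (g := fun m (rng : List Int) => m || decide (1 < rng.length))]
  rw [foldl_lastSel, foldl_or_any]
  simp only [Bool.false_or, List.map_map, rtOf]
  refine congrArg₂ _ ?_ rfl
  -- slice_tuples component
  have hlen : ∀ rng ∈ (List.map (fun p => List.map
        (fun q => tokB dims (List.filter (fun ax => decide (ax ∉ plot_ax)) (PySem.List.pyRange 0 4)) p.1 q.1 q.2)
        (PySem.List.enumerate (PySem.Chars.splitOn p.2 [':'])))
      (PySem.List.enumerate (PySem.Chars.splitOn cmd_str.toList [',']))), rng.length ≠ 0 := by
    intro rng hm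
    simp only [List.mem_map] at hm
    obtain ⟨p, _, rfl⟩ := hm
    exact fun h => rtOf_ne_nil dims _ p.1 p.2 (List.length_eq_zero_iff.mp h)
  cases hfind : List.find? (fun r => r.length == 2 || r.length == 3)
      ((List.map (fun p => List.map
          (fun q => tokB dims (List.filter (fun ax => decide (ax ∉ plot_ax)) (PySem.List.pyRange 0 4)) p.1 q.1 q.2)
          (PySem.List.enumerate (PySem.Chars.splitOn p.2 [':'])))
        (PySem.List.enumerate (PySem.Chars.splitOn cmd_str.toList [',']))).reverse) with
  | some r =>
      simp only [Option.map_some, Option.getD_some, rngOf]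
      split_ifs <;>
        · apply List.map_congr_left
          intro r _
          rw [inner_eq _ hlen]
          simp [Function.comp]
  | none =>
      simp only [Option.map_none, Option.getD_none]
      apply List.map_congr_left
      intro r _
      rw [inner_eq _ hlen]
      simp [Function.comp]
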